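-- pv_equiv track=rewrite | github.com/lichkkkk/LeetCode_G-C | 123-BestTimeToBuyAndSellStockIII/123. Best Time to Buy and Sell Stock III.py | maxProfit_help2
-- ===== SOURCE A (Python) =====
-- def maxProfit_help2(prices):
--     """
--     :type prices: List[int]
--     :rtype: int
--     """
--     if prices == []:
--         return 0
--     max_price = prices[-1]
--     max_profit=0
--     profit = [0]*len(prices)
--     for i in range(len(prices)-1,-1,-1):
--         if prices[i] >= max_price:
--             max_price = prices[i]
--         else:
--             max_profit = max(max_profit, max_price-prices[i])
--         profit[i] = max_profit
--     return profit
-- ===== SOURCE B (Python) =====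
-- def maxProfit_help2(prices):
--     """
--     :type prices: List[int]
--     :rtype: int
--     """
--     if prices == []:
--         return 0
--     n = len(prices)
--     # pass 1: suffix maximum of prices
--     suffixmax = [0] * n
--     suffixmax[-1] = prices[-1]
--     for i in range(n - 2, -1, -1):
--         suffixmax[i] = max(prices[i], suffixmax[i + 1])
--     # pass 2: gain obtainable buying on day i and selling at the suffix max
--     gain = [s - p for s, p in zip(suffixmax, prices)]
--     # pass 3: suffix running maximum of the gains
--     out = [0] * n
--     out[-1] = gain[-1]
--     for i in range(n - 2, -1, -1):
--         out[i] = max(gain[i], out[i + 1])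
--     return out
-- ===== Notes on version B (the rewrite author's own statement) =====
-- stated objective: alternative
-- what changed: Replaces A's single fused backward loop carrying (max_price, max_profit) state by three explicit staged passes: a suffix-maximum-price array, a per-day gain array gain[i] = suffixmax[i] - prices[i], and a suffix running maximum of the gains.
-- outside the precondition, e.g. on maxProfit_help2([]): A returns 0, B returns 0
import Mathlib
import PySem

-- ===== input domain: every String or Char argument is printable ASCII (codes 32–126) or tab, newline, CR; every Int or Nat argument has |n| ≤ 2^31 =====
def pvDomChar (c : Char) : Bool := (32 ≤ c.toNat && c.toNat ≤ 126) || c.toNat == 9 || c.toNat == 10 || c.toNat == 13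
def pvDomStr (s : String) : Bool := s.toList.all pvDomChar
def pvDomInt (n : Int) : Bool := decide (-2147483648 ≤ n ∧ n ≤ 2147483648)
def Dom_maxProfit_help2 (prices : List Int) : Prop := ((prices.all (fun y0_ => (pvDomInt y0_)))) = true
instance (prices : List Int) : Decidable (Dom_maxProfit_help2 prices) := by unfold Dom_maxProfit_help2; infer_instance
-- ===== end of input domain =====

-- B replaces A's fused backward loop by three staged passes (suffix max, gains, suffix max of gains);
-- same cost, different decomposition. On [] the Python functions return the int 0, not a list, so Pre_ excludes [].

-- ===== PORT A =====
-- A's backward loop over i = n-1 … 0 with state (max_price, max_profit, profit-so-far),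
-- rendered as the obvious structural recursion processing the suffix first; the base case [p]
-- is the first iteration (max_price initialised to prices[-1], so the `≥` branch fires with equality).
def maxProfit_help2_go : List Int → Int × Int × List Int
  | [] => (0, 0, [])
  | [p] => (p, 0, [0])
  | p :: q :: rest =>
    let s := maxProfit_help2_go (q :: rest)
    let mp := s.1
    let mf := s.2.1
    let prof := s.2.2
    if p ≥ mp then (p, mf, mf :: prof)
    else
      let mf' := max mf (mp - p)
      (mp, mf', mf' :: prof)

def maxProfit_help2 (prices : List Int) : List Int :=
  if prices = [] then [] else (maxProfit_help2_go prices).2.2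

-- ===== PORT B =====
-- suffix running maximum of a list (B uses it twice: on prices and on the gains)
def sufMaxRun : List Int → List Int
  | [] => []
  | [p] => [p]
  | p :: q :: rest =>
    let s := sufMaxRun (q :: rest)
    max p (s.headD 0) :: s

def maxProfit_help2_alt (prices : List Int) : List Int :=
  if prices = [] then []
  else
    let suffixmax := sufMaxRun prices
    let gain := List.zipWith (fun s p => s - p) suffixmax prices
    sufMaxRun gain

-- ===== PRECONDITION & SPEC =====
-- Pre_ excludes only the empty list: there the Python functions return the int 0, which is not a value of the list return type.
def Pre_maxProfit_help2 (prices : List Int) : Prop := prices ≠ []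
instance (prices : List Int) : Decidable (Pre_maxProfit_help2 prices) := by unfold Pre_maxProfit_help2; infer_instance
def pvWitness_maxProfit_help2 : List Int := [3, 1, 4, 1, 5]

def Spec_maxProfit_help2 (prices : List Int) (out : List Int) : Prop := out = maxProfit_help2_alt prices
instance (prices : List Int) (out : List Int) : Decidable (Spec_maxProfit_help2 prices out) := by unfold Spec_maxProfit_help2; infer_instance

-- ===== CLAIM (what is proved, stated in full; the proofs are below) =====
def Claim_equal_maxProfit_help2 : Prop := ∀ (prices : List Int), Dom_maxProfit_help2 prices → Pre_maxProfit_help2 prices → Spec_maxProfit_help2 prices (maxProfit_help2 prices)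

-- ===== LEMMAS AND PROOFS =====

-- B's output on a nonempty list, as a function
def pvOutB (l : List Int) : List Int :=
  sufMaxRun (List.zipWith (fun s p => s - p) (sufMaxRun l) l)

lemma sufMaxRun_ne_nil (l : List Int) (h : l ≠ []) : sufMaxRun l ≠ [] := by
  match l with
  | [] => exact absurd rfl h
  | [p] => simp [sufMaxRun]
  | p :: q :: rest => simp [sufMaxRun]

lemma pvOutB_ne_nil (l : List Int) (h : l ≠ []) : pvOutB l ≠ [] := by
  apply sufMaxRun_ne_nil
  match l with
  | [] => exact absurd rfl h
  | [p] => simp [sufMaxRun]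
  | p :: q :: rest => simp [sufMaxRun]

lemma sufMaxRun_cons (g z : Int) (zs : List Int) :
    sufMaxRun (g :: z :: zs) = max g ((sufMaxRun (z :: zs)).headD 0) :: sufMaxRun (z :: zs) := by
  simp [sufMaxRun]

-- Invariant: A's loop state equals (head of suffix-max of prices, head of B's output, B's output),
-- and the head of B's output (the best suffix profit) is nonnegative.
lemma pv_key : (l : List Int) → l ≠ [] →
    maxProfit_help2_go l = ((sufMaxRun l).headD 0, (pvOutB l).headD 0, pvOutB l) ∧ 0 ≤ (pvOutB l).headD 0
  | [], h => absurd rfl h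
  | [p], _ => by simp [maxProfit_help2_go, pvOutB, sufMaxRun]
  | p :: q :: rest, _ => by
    obtain ⟨ih, ihpos⟩ := pv_key (q :: rest) (by simp)
    have hs : sufMaxRun (q :: rest) ≠ [] := sufMaxRun_ne_nil _ (by simp)
    have ho : pvOutB (q :: rest) ≠ [] := pvOutB_ne_nil _ (by simp)
    obtain ⟨m, stail, hsm⟩ : ∃ m stail, sufMaxRun (q :: rest) = m :: stail := by
      cases hm : sufMaxRun (q :: rest) with
      | nil => exact absurd hm hs
      | cons a t => exact ⟨a, t, rfl⟩
    obtain ⟨o, otail, hom⟩ : ∃ o otail, pvOutB (q :: rest) = o :: otail := by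
      cases hm : pvOutB (q :: rest) with
      | nil => exact absurd hm ho
      | cons a t => exact ⟨a, t, rfl⟩
    rw [hom] at ihpos
    simp only [List.headD_cons] at ihpos
    have hlen : (sufMaxRun (q :: rest)).length = (q :: rest).length := by
      clear ih ihpos hs ho hsm hom m stail o otail
      induction rest generalizing q with
      | nil => simp [sufMaxRun]
      | cons r rs ihl => simp [sufMaxRun, ihl]
    have hSM : sufMaxRun (p :: q :: rest) = max p m :: m :: stail := by
      simp [sufMaxRun, hsm]
    have hB : pvOutB (p :: q :: rest) = max (max p m - p) o :: o :: otail := by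
      have hzip : List.zipWith (fun s t => s - t) (sufMaxRun (p :: q :: rest)) (p :: q :: rest)
          = (max p m - p) :: List.zipWith (fun s t => s - t) (sufMaxRun (q :: rest)) (q :: rest) := by
        simp [sufMaxRun, hsm]
      have hzne : List.zipWith (fun s t => s - t) (sufMaxRun (q :: rest)) (q :: rest) ≠ [] := by
        intro hc
        have := congrArg List.length hc
        simp [hlen] at this
      unfold pvOutB
      rw [hzip]
      cases hz : List.zipWith (fun s t => s - t) (sufMaxRun (q :: rest)) (q :: rest) with
      | nil => exact absurd hz hzne
      | cons z zs =>
        have hOtail : sufMaxRun (z :: zs) = o :: otail := by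
          have hq : pvOutB (q :: rest) = sufMaxRun (z :: zs) := by unfold pvOutB; rw [hz]
          rw [← hq, hom]
        rw [sufMaxRun_cons, hOtail]
        simp
    refine ⟨?_, ?_⟩
    · show maxProfit_help2_go (p :: q :: rest) = _
      simp only [maxProfit_help2_go, ih, hsm, hom, List.headD_cons, hB, hSM]
      split_ifs with hp
      · have h1 : max p m = p := by omega
        rw [h1]
        have h2 : max (p - p) o = o := by omega
        rw [h2]
      · have h1 : max p m = m := by omega
        rw [h1, max_comm o (m - p)]
    · rw [hB]
      simp only [List.headD_cons]
      omega

-- ===== VERDICT (by name: the statement is the Claim_ definition above) =====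
theorem maxProfit_help2_spec : Claim_equal_maxProfit_help2 := by
  intro prices _ hpre
  unfold Spec_maxProfit_help2 maxProfit_help2 maxProfit_help2_alt
  have := (pv_key prices hpre).1
  simp only [if_neg hpre]
  rw [this]
  rfl
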